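/- GENERATED by c/gen_decode.py: decode facts of the image, one per distinct instruction byte string. -/
import UserX.DecodeImage

#decode_all ProgX.Base.Dec
  "0f8285010000"  -- jb 102ad4
  "41880424"  -- mov BYTE PTR [r12],al
  "4881ffffffff00"  -- cmp rdi,0xffffff
  "4889c6"  -- mov rsi,rax
  "488d2c00"  -- lea rbp,[rax+rax*1]
  "4939f0"  -- cmp r8,rsi
  "4c39f3"  -- cmp rbx,r14
  "660f28d9"  -- movapd xmm3,xmm1
  "7225"  -- jb 102cdc
  "7501"  -- jne 100b46
  "7a1a"  -- jp 102abb
  "89fa"  -- mov edx,edi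
  "c3"  -- ret
  "e88afbffff"  -- call 100059
  "e8e7f4ffff"  -- call 100059
  "ebc6"  -- jmp 103b73
  "f20f2cc1"  -- cvttsd2si eax,xmm1
  "f20f59157bdc0300"  -- mulsd xmm2,QWORD PTR [rip+0x3dc7b]
  "f20f5e153ce00300"  -- divsd xmm2,QWORD PTR [rip+0x3e03c]
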